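-- pv_equiv track=rewrite | github.com/nitro-panks/battlestats | server/warships/agentic/graph.py | _plan_has_docs_and_api_test_step
-- ===== SOURCE A (Python) =====
-- def _is_generic_doctrine_step(step: str) -> bool:
--     normalized = step.lower()
--     return any(
--         normalized.startswith(prefix)
--         for prefix in (
--             "clarify acceptance criteria for:",
--             "avoid battlestats doctrine anti-patterns:",
--             "review the approach against battlestats doctrine:",
--             "confirm the change can clear pre-commit doctrine requirements:",
--             "review relevant battlestats guidance artifacts before implementation:",
--         )
--     )
--
-- def _plan_has_docs_and_api_test_step(plan: list[str]) -> bool: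
--     has_docs = any(
--         not _is_generic_doctrine_step(step)
--         and any(token in step.lower() for token in ("documentation", "docs", "runbook", "readme"))
--         for step in plan
--     )
--     has_tests = any(
--         not _is_generic_doctrine_step(step)
--         and
--         not step.lower().startswith("implement the smallest safe change and validate")
--         and not step.lower().startswith("identify files and tests affected by the task")
--         and any(token in step.lower() for token in ("test", "validat", "regression"))
--         for step in plan
--     )
--     return has_docs and has_tests
-- ===== SOURCE B (Python) =====
-- _GENERIC_PREFIXES = (
--     "clarify acceptance criteria for:",
--     "avoid battlestats doctrine anti-patterns:",
--     "review the approach against battlestats doctrine:",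
--     "confirm the change can clear pre-commit doctrine requirements:",
--     "review relevant battlestats guidance artifacts before implementation:",
-- )
--
-- def _plan_has_docs_and_api_test_step(plan):
--     has_docs = False
--     has_tests = False
--     for step in plan:
--         if has_docs and has_tests:
--             break
--         normalized = step.lower()
--         generic = False
--         for prefix in _GENERIC_PREFIXES:
--             if normalized.startswith(prefix):
--                 generic = True
--                 break
--         if generic:
--             continue
--         if not has_docs:
--             for token in ("documentation", "docs", "runbook", "readme"):
--                 if token in normalized:
--                     has_docs = True
--                     break
--         if not has_tests:
--             if not normalized.startswith("implement the smallest safe change and validate") \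
--                and not normalized.startswith("identify files and tests affected by the task"):
--                 for token in ("test", "validat", "regression"):
--                     if token in normalized:
--                         has_tests = True
--                         break
--     return has_docs and has_tests
-- ===== Notes on version B (the rewrite author's own statement) =====
-- stated objective: faster
-- what changed: Replaces A's two separate any() scans over the plan with one loop that maintains has_docs/has_tests booleans, lowercases and classifies each step once (instead of re-lowercasing per check), and breaks early when both flags are set.
import Mathlib
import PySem

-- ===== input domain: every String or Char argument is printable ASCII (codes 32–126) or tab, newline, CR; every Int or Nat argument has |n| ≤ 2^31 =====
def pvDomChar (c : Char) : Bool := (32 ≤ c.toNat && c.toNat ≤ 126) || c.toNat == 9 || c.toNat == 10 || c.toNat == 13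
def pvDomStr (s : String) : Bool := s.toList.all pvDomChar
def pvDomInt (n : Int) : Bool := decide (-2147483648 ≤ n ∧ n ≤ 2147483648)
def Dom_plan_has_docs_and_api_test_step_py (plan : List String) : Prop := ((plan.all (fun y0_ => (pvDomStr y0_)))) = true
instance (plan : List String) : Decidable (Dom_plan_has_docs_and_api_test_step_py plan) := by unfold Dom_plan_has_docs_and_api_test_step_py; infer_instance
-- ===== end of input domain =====

-- B: one loop with two boolean accumulators, one lower() per step and early exit, instead of A's two any() scans (objective: faster, constant-factor).

-- ===== PORT A =====
-- helper: _is_generic_doctrine_step, an any() over a tuple of prefixes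
def isGenericDoctrineStep (step : String) : Bool :=
  let normalized := PySem.Str.lower step
  ["clarify acceptance criteria for:",
   "avoid battlestats doctrine anti-patterns:",
   "review the approach against battlestats doctrine:",
   "confirm the change can clear pre-commit doctrine requirements:",
   "review relevant battlestats guidance artifacts before implementation:"].any
    (fun pfx => PySem.Str.startswith normalized pfx)

def plan_has_docs_and_api_test_step_py (plan : List String) : Bool :=
  let has_docs := plan.any (fun step =>
    !isGenericDoctrineStep step &&
    (["documentation", "docs", "runbook", "readme"].any
      (fun token => PySem.Str.isIn token (PySem.Str.lower step))))
  let has_tests := plan.any (fun step =>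
    !isGenericDoctrineStep step &&
    !PySem.Str.startswith (PySem.Str.lower step) "implement the smallest safe change and validate" &&
    !PySem.Str.startswith (PySem.Str.lower step) "identify files and tests affected by the task" &&
    (["test", "validat", "regression"].any
      (fun token => PySem.Str.isIn token (PySem.Str.lower step))))
  has_docs && has_tests

-- ===== PORT B =====
-- B helper: explicit loop over the prefix tuple with break
def pvGenericBLoop (normalized : String) : List String → Bool
  | [] => false
  | pfx :: rest =>
    if PySem.Str.startswith normalized pfx then true else pvGenericBLoop normalized rest

def pvGenericB (normalized : String) : Bool :=
  pvGenericBLoop normalized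
    ["clarify acceptance criteria for:",
     "avoid battlestats doctrine anti-patterns:",
     "review the approach against battlestats doctrine:",
     "confirm the change can clear pre-commit doctrine requirements:",
     "review relevant battlestats guidance artifacts before implementation:"]

-- B helper: first-token-found loop with break
def pvTokenLoop (normalized : String) : List String → Bool
  | [] => false
  | token :: rest =>
    if PySem.Str.isIn token normalized then true else pvTokenLoop normalized rest

-- B's main loop: two accumulators, early break when both are set
def pvPlanLoop : List String → Bool → Bool → Bool
  | [], has_docs, has_tests => has_docs && has_tests
  | step :: rest, has_docs, has_tests =>
    if has_docs && has_tests then true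
    else
      let normalized := PySem.Str.lower step
      if pvGenericB normalized then pvPlanLoop rest has_docs has_tests
      else
        let has_docs' :=
          if has_docs then true
          else pvTokenLoop normalized ["documentation", "docs", "runbook", "readme"]
        let has_tests' :=
          if has_tests then true
          else if !PySem.Str.startswith normalized "implement the smallest safe change and validate" &&
                  !PySem.Str.startswith normalized "identify files and tests affected by the task" then
            pvTokenLoop normalized ["test", "validat", "regression"]
          else false
        pvPlanLoop rest has_docs' has_tests'

def plan_has_docs_and_api_test_step_py_alt (plan : List String) : Bool :=
  pvPlanLoop plan false false

-- ===== PRECONDITION & SPEC =====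
def Spec_plan_has_docs_and_api_test_step_py (plan : List String) (out : Bool) : Prop := out = plan_has_docs_and_api_test_step_py_alt plan
instance (plan : List String) (out : Bool) : Decidable (Spec_plan_has_docs_and_api_test_step_py plan out) := by unfold Spec_plan_has_docs_and_api_test_step_py; infer_instance

-- ===== CLAIM (what is proved, stated in full; the proofs are below) =====
def Claim_equal_plan_has_docs_and_api_test_step_py : Prop := ∀ (plan : List String), Dom_plan_has_docs_and_api_test_step_py plan → Spec_plan_has_docs_and_api_test_step_py plan (plan_has_docs_and_api_test_step_py plan)

-- ===== LEMMAS AND PROOFS =====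
-- atoms: A's per-step predicates (definitionally the lambdas of port A)
def pvDocTok (step : String) : Bool :=
  ["documentation", "docs", "runbook", "readme"].any
    (fun token => PySem.Str.isIn token (PySem.Str.lower step))

def pvTestTok (step : String) : Bool :=
  ["test", "validat", "regression"].any
    (fun token => PySem.Str.isIn token (PySem.Str.lower step))

def pvTestGuard (step : String) : Bool :=
  !PySem.Str.startswith (PySem.Str.lower step) "implement the smallest safe change and validate" &&
  !PySem.Str.startswith (PySem.Str.lower step) "identify files and tests affected by the task"

def pvDocsPred (step : String) : Bool := !isGenericDoctrineStep step && pvDocTok step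

def pvTestsPred (step : String) : Bool :=
  !isGenericDoctrineStep step &&
  !PySem.Str.startswith (PySem.Str.lower step) "implement the smallest safe change and validate" &&
  !PySem.Str.startswith (PySem.Str.lower step) "identify files and tests affected by the task" &&
  pvTestTok step

theorem pvGenericBLoop_eq_any (n : String) (ps : List String) :
    pvGenericBLoop n ps = ps.any (fun pfx => PySem.Str.startswith n pfx) := by
  induction ps with
  | nil => rfl
  | cons p rest ih =>
    rw [pvGenericBLoop, List.any_cons, ih]
    split_ifs with h <;> simp only [h, Bool.true_or, Bool.false_or]

theorem pvGenericB_eq (step : String) :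
    pvGenericB (PySem.Str.lower step) = isGenericDoctrineStep step := by
  rw [pvGenericB, pvGenericBLoop_eq_any]; rfl

theorem pvTokenLoop_eq_any (n : String) (ts : List String) :
    pvTokenLoop n ts = ts.any (fun t => PySem.Str.isIn t n) := by
  induction ts with
  | nil => rfl
  | cons t rest ih =>
    rw [pvTokenLoop, List.any_cons, ih]
    split_ifs with h <;> simp only [h, Bool.true_or, Bool.false_or]

theorem pvDocTokLoop_eq (step : String) :
    pvTokenLoop (PySem.Str.lower step) ["documentation", "docs", "runbook", "readme"] =
      pvDocTok step := by
  rw [pvTokenLoop_eq_any]; rfl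

theorem pvTestTokLoop_eq (step : String) :
    pvTokenLoop (PySem.Str.lower step) ["test", "validat", "regression"] = pvTestTok step := by
  rw [pvTokenLoop_eq_any]; rfl

theorem pvPlanLoop_eq (plan : List String) (hd ht : Bool) :
    pvPlanLoop plan hd ht = ((hd || plan.any pvDocsPred) && (ht || plan.any pvTestsPred)) := by
  induction plan generalizing hd ht with
  | nil => cases hd <;> cases ht <;> rfl
  | cons step rest ih =>
    show (if hd && ht then true
          else if pvGenericB (PySem.Str.lower step) then pvPlanLoop rest hd ht
          else pvPlanLoop rest
            (if hd then true
             else pvTokenLoop (PySem.Str.lower step) ["documentation", "docs", "runbook", "readme"])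
            (if ht then true
             else if pvTestGuard step then
               pvTokenLoop (PySem.Str.lower step) ["test", "validat", "regression"]
             else false)) =
        ((hd || (step :: rest).any pvDocsPred) && (ht || (step :: rest).any pvTestsPred))
    rw [pvGenericB_eq, pvDocTokLoop_eq, pvTestTokLoop_eq, List.any_cons, List.any_cons]
    by_cases hg : isGenericDoctrineStep step = true
    · have h1 : pvDocsPred step = false := by simp [pvDocsPred, hg]
      have h2 : pvTestsPred step = false := by simp [pvTestsPred, hg]
      rw [h1, h2]
      cases hd <;> cases ht <;>
        simp only [hg, Bool.and_true, Bool.and_false, Bool.true_and,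
          Bool.true_or, Bool.false_or, if_true, if_false,
          Bool.false_eq_true, ih]
    · simp only [Bool.not_eq_true] at hg
      have h1 : pvDocsPred step = pvDocTok step := by simp [pvDocsPred, hg]
      have h2 : pvTestsPred step = (pvTestGuard step && pvTestTok step) := by
        simp [pvTestsPred, pvTestGuard, hg, Bool.and_assoc]
      rw [h1, h2, hg]
      cases hd <;> cases ht <;>
        cases hA : pvDocTok step <;> cases hB : pvTestGuard step <;> cases hC : pvTestTok step <;>
          simp [ih]

-- ===== VERDICT (by name: the statement is the Claim_ definition above) =====
theorem plan_has_docs_and_api_test_step_py_spec : Claim_equal_plan_has_docs_and_api_test_step_py := by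
  intro plan _
  show plan_has_docs_and_api_test_step_py plan = plan_has_docs_and_api_test_step_py_alt plan
  rw [plan_has_docs_and_api_test_step_py_alt, pvPlanLoop_eq,
    Bool.false_or, Bool.false_or]
  rfl
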